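-- pv_equiv track=rewrite | github.com/sandeepkumar8713/pythonapps | 21_firstFolder/40_min_swap.py | minimumSwap
-- ===== SOURCE A (Python) =====
-- def minimumSwap(s1, s2):
--     seen = set()
--     swaps = 0
--
--     for i in range(len(s1)):
--         if s1[i] != s2[i]:
--             seq = s1[i] + s2[i]
--
--             if seq in seen:
--                 seen.remove(seq)
--                 swaps += 1
--             else:
--                 seen.add(seq)
--
--     if len(seen) == 1:
--         return -1
--     elif len(seen) == 2:
--         return swaps + 2
--     else:
--         return swaps
-- ===== SOURCE B (Python) =====
-- def minimumSwap(s1, s2):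
--     rest = sorted(a + b for a, b in zip(s1, s2) if a != b)
--     swaps = 0
--     odd = 0
--     while rest:
--         run = 1
--         while run < len(rest) and rest[run] == rest[0]:
--             run += 1
--         swaps += run // 2
--         odd += run % 2
--         rest = rest[run:]
--     if odd == 1:
--         return -1
--     if odd == 2:
--         return swaps + 2
--     return swaps
-- ===== Notes on version B (the rewrite author's own statement) =====
-- stated objective: alternative
-- what changed: Replaces A's one-pass parity-toggling set (conditional add/remove per mismatch with an incremental swap counter) by a staged pipeline: collect the mismatch pairs with zip, sort them, and scan the sorted list run by run, adding run//2 to swaps and run%2 to the odd counter.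
import Mathlib
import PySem

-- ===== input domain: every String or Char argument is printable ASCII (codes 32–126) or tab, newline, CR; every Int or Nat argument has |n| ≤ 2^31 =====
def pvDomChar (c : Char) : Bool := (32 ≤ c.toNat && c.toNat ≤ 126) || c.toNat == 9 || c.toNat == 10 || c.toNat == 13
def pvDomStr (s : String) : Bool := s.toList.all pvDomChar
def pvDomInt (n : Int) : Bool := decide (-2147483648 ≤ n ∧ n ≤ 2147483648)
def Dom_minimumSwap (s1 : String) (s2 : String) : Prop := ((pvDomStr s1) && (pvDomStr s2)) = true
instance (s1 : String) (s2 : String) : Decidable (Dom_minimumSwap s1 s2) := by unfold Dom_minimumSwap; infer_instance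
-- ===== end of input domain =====

-- B replaces A's parity-toggling set and incremental swap counter by a staged pipeline:
-- collect the mismatch pairs via zip, sort them, and scan the sorted list run by run
-- (swaps += run // 2, odd += run % 2); objective: alternative decomposition, same O(n) scan after an O(n log n) sort.

-- ===== PORT A =====
-- the loop body's toggle of `seen` (Python's guarded seen.remove / seen.add; remove = discard under the guard)
def pvToggle (st : PySem.Set String × Int) (seq : String) : PySem.Set String × Int :=
  if PySem.Set.contains st.1 seq then (PySem.Set.discard st.1 seq, st.2 + 1)
  else (PySem.Set.add st.1 seq, st.2)

def minimumSwap (s1 : String) (s2 : String) : Int :=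
  let l1 := s1.toList
  let l2 := s2.toList
  -- for i in range(len(s1)); the pyGetD default is unreachable under Pre_minimumSwap
  let st := (PySem.List.pyRange 0 (PySem.List.len l1) 1).foldl
    (fun st i =>
      if PySem.List.pyGetD l1 i ' ' ≠ PySem.List.pyGetD l2 i ' ' then
        pvToggle st (String.ofList [PySem.List.pyGetD l1 i ' ', PySem.List.pyGetD l2 i ' '])
      else st)
    (PySem.Set.empty, 0)
  if PySem.Set.len st.1 = 1 then -1
  else if PySem.Set.len st.1 = 2 then st.2 + 2
  else st.2

-- ===== PORT B =====
-- the outer while loop of Source B: measure the leading run of the sorted list, add run//2 and run%2,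
-- continue on rest[run:]; returns (swaps, odd)
def pvRunScan : Nat → List String → Int × Int
  | _, [] => (0, 0)
  | 0, _ :: _ => (0, 0)  -- fuel exhausted; unreachable, the caller passes fuel = length
  | fuel + 1, x :: xs =>
    -- run = 1; while run < len(rest) and rest[run] == rest[0]: run += 1
    let run : Int := ((xs.takeWhile (· == x)).length : Int) + 1
    -- rest = rest[run:]
    let r := pvRunScan fuel (xs.dropWhile (· == x))
    (r.1 + PySem.Int.floordiv run 2, r.2 + PySem.Int.mod run 2)

def minimumSwap_alt (s1 : String) (s2 : String) : Int :=
  -- rest = sorted(a + b for a, b in zip(s1, s2) if a != b)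
  let rest := PySem.List.sorted
    (((s1.toList.zip s2.toList).filter (fun p => decide (p.1 ≠ p.2))).map
      (fun p => String.ofList [p.1, p.2])) (fun x => x) false
  let r := pvRunScan rest.length rest
  if r.2 = 1 then -1
  else if r.2 = 2 then r.1 + 2
  else r.1

-- ===== PRECONDITION & SPEC =====
-- Pre_ excludes exactly the inputs where Python A raises IndexError (s2 shorter than s1).
def Pre_minimumSwap (s1 : String) (s2 : String) : Prop := s1.toList.length ≤ s2.toList.length
instance (s1 : String) (s2 : String) : Decidable (Pre_minimumSwap s1 s2) := by unfold Pre_minimumSwap; infer_instance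
def pvWitness_minimumSwap : String × String := ("xxyy", "yyxx")

def Spec_minimumSwap (s1 : String) (s2 : String) (out : Int) : Prop := out = minimumSwap_alt s1 s2
instance (s1 : String) (s2 : String) (out : Int) : Decidable (Spec_minimumSwap s1 s2 out) := by unfold Spec_minimumSwap; infer_instance

-- ===== CLAIM (what is proved, stated in full; the proofs are below) =====
def Claim_equal_minimumSwap : Prop := ∀ (s1 : String) (s2 : String), Dom_minimumSwap s1 s2 → Pre_minimumSwap s1 s2 → Spec_minimumSwap s1 s2 (minimumSwap s1 s2)

-- ===== LEMMAS AND PROOFS =====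

-- a fold whose step acts only when a guard holds is a fold over the filtered, mapped list
theorem pv_foldl_guard {α β σ : Type} (f : σ → β → σ) (c : α → Prop) [DecidablePred c]
    (p : α → β) : ∀ (l : List α) (s : σ),
    l.foldl (fun s a => if c a then f s (p a) else s) s
      = ((l.filter (fun a => decide (c a))).map p).foldl f s := by
  intro l
  induction l with
  | nil => intro s; rfl
  | cons x xs ih =>
    intro s
    by_cases hx : c x <;> simp [hx, ih]

-- sums of maps that differ at exactly one element of a Nodup list
theorem pv_sum_map_update {α : Type} [DecidableEq α] {l : List α} {x : α}
    (hnd : l.Nodup) (hx : x ∈ l) (f g : α → Int)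
    (h : ∀ y ∈ l, y ≠ x → f y = g y) :
    (l.map f).sum = (l.map g).sum + (f x - g x) := by
  induction l with
  | nil => cases hx
  | cons a as ih =>
    rcases List.mem_cons.mp hx with rfl | hx'
    · have : ∀ y ∈ as, f y = g y := by
        intro y hy
        exact h y (List.mem_cons_of_mem _ hy) (by rintro rfl; exact (List.nodup_cons.mp hnd).1 hy)
      simp [List.map_congr_left this]; ring
    · have ha : f a = g a := h a (List.mem_cons_self) (by rintro rfl; exact (List.nodup_cons.mp hnd).1 hx')
      have := ih (List.nodup_cons.mp hnd).2 hx' (fun y hy => h y (List.mem_cons_of_mem _ hy))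
      simp [ha, this]; ring

-- the invariant of A's toggling loop over an arbitrary pair list ms
theorem pv_toggle_inv (ms : List String) :
    (ms.foldl pvToggle (PySem.Set.empty, 0)).1.Nodup
    ∧ (∀ k, k ∈ (ms.foldl pvToggle (PySem.Set.empty, 0)).1 ↔ (k ∈ ms ∧ ms.count k % 2 = 1))
    ∧ (ms.foldl pvToggle (PySem.Set.empty, 0)).2
        = ((PySem.Set.ofList ms).map (fun k => PySem.Int.floordiv ((ms.count k : Int)) 2)).sum := by
  induction ms using List.reverseRecOn with
  | nil => refine ⟨List.nodup_nil, ?_, ?_⟩ <;> simp [PySem.Set.empty, PySem.Set.ofList]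
  | append_singleton ms x ih =>
    obtain ⟨hnd, hmem, hsum⟩ := ih
    set st := ms.foldl pvToggle (PySem.Set.empty, 0) with hst
    have hfold : (ms ++ [x]).foldl pvToggle (PySem.Set.empty, 0) = pvToggle st x := by
      simp [List.foldl_append, hst]
    have hcount : ∀ k, (ms ++ [x]).count k = ms.count k + (if k = x then 1 else 0) := by
      intro k
      rw [List.count_append, List.count_singleton]
      by_cases h : k = x
      · subst h; simp
      · have hxk : ¬ (x == k) = true := by simp [beq_iff_eq]; exact fun e => h e.symm
        simp [h, hxk]
    have hS : PySem.Set.ofList (ms ++ [x]) = PySem.Set.add (PySem.Set.ofList ms) x :=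
      PySem.Set.ofList_append_singleton ms x
    by_cases hx : x ∈ st.1
    · -- x is in seen: count x is odd; remove it, swaps + 1
      have hodd : ms.count x % 2 = 1 := ((hmem x).mp hx).2
      have hxms : x ∈ ms := ((hmem x).mp hx).1
      have hstep : pvToggle st x = (PySem.Set.discard st.1 x, st.2 + 1) := by
        simp [pvToggle, hx]
      refine ⟨?_, ?_, ?_⟩ <;> rw [hfold, hstep]
      · exact PySem.Set.nodup_discard st.1 x hnd
      · intro k
        rw [PySem.Set.mem_discard st.1 x k, hmem k, hcount k]
        by_cases hk : k = x
        · subst hk; simp [hodd]; omega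
        · simp [hk]
      · rw [hS, PySem.Set.add_of_mem ((PySem.Set.mem_ofList ms x).mpr hxms)]
        have hxS : x ∈ PySem.Set.ofList ms := (PySem.Set.mem_ofList ms x).mpr hxms
        rw [pv_sum_map_update (PySem.Set.nodup_ofList ms) hxS
          (fun k => PySem.Int.floordiv (((ms ++ [x]).count k : Int)) 2)
          (fun k => PySem.Int.floordiv ((ms.count k : Int)) 2)
          (by intro y _ hy; simp only [hcount]; simp [hy])]
        rw [hcount x]
        have : PySem.Int.floordiv ((ms.count x + 1 : Nat) : Int) 2
             = PySem.Int.floordiv ((ms.count x : Nat) : Int) 2 + 1 := by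
          rw [show ((ms.count x + 1 : Nat) : Int) = ((ms.count x : Nat) : Int) + 1 by push_cast; ring]
          rw [PySem.Int.floordiv_eq_ediv_of_pos (by omega), PySem.Int.floordiv_eq_ediv_of_pos (by omega)]
          omega
        rw [if_pos rfl]
        push_cast
        push_cast at this
        omega
    · -- x not in seen: count x is even; add it, swaps unchanged
      have heven : ¬ (x ∈ ms ∧ ms.count x % 2 = 1) := fun h => hx ((hmem x).mpr h)
      have hstep : pvToggle st x = (PySem.Set.add st.1 x, st.2) := by
        simp [pvToggle, hx]
      refine ⟨?_, ?_, ?_⟩ <;> rw [hfold, hstep]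
      · exact PySem.Set.nodup_add st.1 x hnd
      · intro k
        rw [PySem.Set.mem_add st.1 x k, hmem k, hcount k]
        by_cases hk : k = x
        · subst hk
          have : ms.count k % 2 = 0 := by
            by_cases hkm : k ∈ ms
            · by_contra hc
              exact heven ⟨hkm, by omega⟩
            · simp [List.count_eq_zero_of_not_mem hkm]
          simp [this]
          omega
        · simp [hk]
      · rw [hS]
        by_cases hxms : x ∈ ms
        · have hcx : ms.count x % 2 = 0 := by
            by_contra hc
            exact heven ⟨hxms, by omega⟩
          rw [PySem.Set.add_of_mem ((PySem.Set.mem_ofList ms x).mpr hxms)]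
          have hxS : x ∈ PySem.Set.ofList ms := (PySem.Set.mem_ofList ms x).mpr hxms
          rw [pv_sum_map_update (PySem.Set.nodup_ofList ms) hxS
            (fun k => PySem.Int.floordiv (((ms ++ [x]).count k : Int)) 2)
            (fun k => PySem.Int.floordiv ((ms.count k : Int)) 2)
            (by intro y _ hy; simp only [hcount]; simp [hy])]
          rw [hcount x]
          have : PySem.Int.floordiv ((ms.count x + 1 : Nat) : Int) 2
               = PySem.Int.floordiv ((ms.count x : Nat) : Int) 2 := by
            rw [show ((ms.count x + 1 : Nat) : Int) = ((ms.count x : Nat) : Int) + 1 by push_cast; ring]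
            rw [PySem.Int.floordiv_eq_ediv_of_pos (by omega), PySem.Int.floordiv_eq_ediv_of_pos (by omega)]
            omega
          rw [if_pos rfl]
          push_cast
          push_cast at this
          omega
        · rw [PySem.Set.add_of_not_mem (fun h => hxms ((PySem.Set.mem_ofList ms x).mp h))]
          rw [List.map_append, List.sum_append]
          have h1 : ((PySem.Set.ofList ms).map (fun k => PySem.Int.floordiv (((ms ++ [x]).count k : Int)) 2))
                  = ((PySem.Set.ofList ms).map (fun k => PySem.Int.floordiv ((ms.count k : Int)) 2)) := by
            apply List.map_congr_left
            intro y hy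
            have hyx : y ≠ x := fun h => hxms ((PySem.Set.mem_ofList ms y).mp hy |> (h ▸ ·))
            rw [hcount y]
            simp [hyx]
          have h2 : PySem.Int.floordiv (((ms ++ [x]).count x : Int)) 2 = 0 := by
            rw [hcount x, List.count_eq_zero_of_not_mem hxms, if_pos rfl,
                PySem.Int.floordiv_eq_ediv_of_pos (by omega)]
            norm_num
          rw [h1]
          simp only [List.map_cons, List.map_nil, List.sum_cons, List.sum_nil]
          rw [h2, hsum]
          ring

-- A's range/indexing mismatch list equals B's zip mismatch list when s2 is long enough
theorem pv_base : ∀ (l1 l2 : List Char), l1.length ≤ l2.length →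
      ((List.range l1.length).filter
          (fun i => decide (l1.getD i ' ' ≠ l2.getD i ' '))).map
        (fun i => String.ofList [l1.getD i ' ', l2.getD i ' '])
      = ((l1.zip l2).filter (fun p => decide (p.1 ≠ p.2))).map (fun p => String.ofList [p.1, p.2]) := by
    intro l1
    induction l1 with
    | nil => intro l2 _; simp
    | cons a l1 ih =>
      intro l2 hlen
      cases l2 with
      | nil => simp at hlen
      | cons b l2 =>
        have hlen' : l1.length ≤ l2.length := by simpa using hlen
        rw [show (a :: l1).length = l1.length + 1 from rfl, List.range_succ_eq_map]
        have hp : ((fun i => decide ((a :: l1).getD i ' ' ≠ (b :: l2).getD i ' ')) ∘ (· + 1))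
            = (fun i => decide (l1.getD i ' ' ≠ l2.getD i ' ')) := by
          funext i; simp [Function.comp]
        have hf : ((fun i => String.ofList [(a :: l1).getD i ' ', (b :: l2).getD i ' ']) ∘ (· + 1))
            = (fun i => String.ofList [l1.getD i ' ', l2.getD i ' ']) := by
          funext i; simp [Function.comp]
        by_cases hab : a = b
        · subst hab
          simp only [List.filter_cons, List.zip_cons_cons, List.getD_cons_zero, ne_eq,
            not_true_eq_false, decide_false, Bool.false_eq_true, if_false, List.filter_map,
            List.map_map, hp, hf]
          exact ih l2 hlen'
        · simp only [List.filter_cons, List.zip_cons_cons, List.getD_cons_zero, ne_eq, hab,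
            not_false_eq_true, decide_true, if_true, List.filter_map, List.map_map,
            List.map_cons, hp, hf]
          rw [ih l2 hlen']

theorem pv_ms_eq : ∀ (l1 l2 : List Char), l1.length ≤ l2.length →
    ((PySem.List.pyRange 0 (PySem.List.len l1) 1).filter
        (fun i => decide (PySem.List.pyGetD l1 i ' ' ≠ PySem.List.pyGetD l2 i ' '))).map
      (fun i => String.ofList [PySem.List.pyGetD l1 i ' ', PySem.List.pyGetD l2 i ' '])
    = ((l1.zip l2).filter (fun p => decide (p.1 ≠ p.2))).map (fun p => String.ofList [p.1, p.2]) := by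
  intro l1 l2 hlen
  have h1 : PySem.List.len l1 = (l1.length : Int) := by simp [PySem.List.len]
  have hp : ((fun i => decide (PySem.List.pyGetD l1 i ' ' ≠ PySem.List.pyGetD l2 i ' ')) ∘ (fun k : Nat => (k : Int)))
      = (fun i => decide (l1.getD i ' ' ≠ l2.getD i ' ')) := by
    funext i; simp [Function.comp, PySem.List.pyGetD_natCast, List.getD]
  have hf : ((fun i => String.ofList [PySem.List.pyGetD l1 i ' ', PySem.List.pyGetD l2 i ' ']) ∘ (fun k : Nat => (k : Int)))
      = (fun i => String.ofList [l1.getD i ' ', l2.getD i ' ']) := by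
    funext i; simp [Function.comp, PySem.List.pyGetD_natCast, List.getD]
  rw [h1, PySem.List.pyRange_zero_natCast, List.filter_map, List.map_map, hp, hf]
  exact pv_base l1 l2 hlen

-- the run scan over a sorted list computes, per distinct element, count // 2 and count % 2
theorem pv_runScan_spec : ∀ (fuel : Nat) (l : List String), l.length ≤ fuel → l.Pairwise (· ≤ ·) →
    (pvRunScan fuel l).1 = ((PySem.Set.ofList l).map (fun k => PySem.Int.floordiv ((l.count k : Int)) 2)).sum
    ∧ (pvRunScan fuel l).2 = ((PySem.Set.ofList l).map (fun k => PySem.Int.mod ((l.count k : Int)) 2)).sum := by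
  intro fuel
  induction fuel with
  | zero =>
    intro l hl _
    have : l = [] := List.eq_nil_of_length_eq_zero (Nat.le_zero.mp hl)
    subst this
    simp [pvRunScan, PySem.Set.ofList]
  | succ fuel ih =>
    intro l hl hpw
    cases l with
    | nil => simp [pvRunScan, PySem.Set.ofList]
    | cons x xs =>
      -- abbreviations
      set t := xs.takeWhile (· == x) with ht
      set r := xs.dropWhile (· == x) with hr
      have hxs : xs = t ++ r := (List.takeWhile_append_dropWhile (p := (· == x)) (l := xs)).symm
      have htx : ∀ y ∈ t, y = x := by
        intro y hy
        have := List.mem_takeWhile_imp hy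
        simpa [beq_iff_eq] using this
      have hx_le : ∀ y ∈ xs, x ≤ y := fun y hy => (List.pairwise_cons.mp hpw).1 y hy
      have hpxs : xs.Pairwise (· ≤ ·) := (List.pairwise_cons.mp hpw).2
      have hpr : r.Pairwise (· ≤ ·) := hpxs.sublist (List.dropWhile_sublist _)
      have hrx : ∀ z ∈ r, z ≠ x := by
        cases hR : r with
        | nil => simp
        | cons y0 rt =>
          have hy0ne : ¬ (y0 == x) = true := by
            have := List.head?_dropWhile_not (· == x) xs
            rw [← hr, hR] at this
            simpa using this
          have hy0x : y0 ≠ x := by simpa [beq_iff_eq] using hy0ne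
          have hy0mem : y0 ∈ xs := (List.dropWhile_sublist _).mem (by rw [← hr, hR]; exact List.mem_cons_self)
          have hxy0 : x < y0 := lt_of_le_of_ne (hx_le y0 hy0mem) (Ne.symm hy0x)
          intro z hz
          rcases List.mem_cons.mp hz with rfl | hz'
          · exact hy0x
          · have hy0z : y0 ≤ z := by
              have hpr' : (y0 :: rt).Pairwise (· ≤ ·) := by rw [← hR]; exact hpr
              exact (List.pairwise_cons.mp hpr').1 z hz'
            exact fun h => absurd (lt_of_lt_of_le hxy0 hy0z) (by simp [h])
      have hct : t.count x = t.length := by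
        rw [List.count_eq_length.mpr (by intro y hy; exact ((htx y hy) ▸ rfl))]
      have hcr : r.count x = 0 := List.count_eq_zero_of_not_mem (fun h => hrx x h rfl)
      have hcx : (x :: xs).count x = t.length + 1 := by
        rw [List.count_cons_self, hxs, List.count_append, hct, hcr]
      have hck : ∀ k, k ≠ x → (x :: xs).count k = r.count k := by
        intro k hk
        have h0 : List.count k t = 0 := List.count_eq_zero_of_not_mem (fun h => hk (htx k h))
        rw [hxs]
        simp [List.count_cons, List.count_append, h0]
        exact fun h => hk h.symm
      -- distinct elements: ofList (x :: xs) is a permutation of x :: ofList r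
      have hxr : x ∉ PySem.Set.ofList r := fun h => hrx x ((PySem.Set.mem_ofList r x).mp h) rfl
      have hmemiff : ∀ k, k ∈ PySem.Set.ofList (x :: xs) ↔ k ∈ x :: PySem.Set.ofList r := by
        intro k
        simp only [PySem.Set.mem_ofList, List.mem_cons]
        constructor
        · rintro (rfl | hk)
          · exact Or.inl rfl
          · rw [hxs] at hk
            rcases List.mem_append.mp hk with hk | hk
            · exact Or.inl (htx k hk)
            · exact Or.inr hk
        · rintro (rfl | hk)
          · exact Or.inl rfl
          · exact Or.inr (by rw [hxs]; exact List.mem_append.mpr (Or.inr hk))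
      have hperm : (PySem.Set.ofList (x :: xs)).Perm (x :: PySem.Set.ofList r) := by
        apply (List.perm_ext_iff_of_nodup (PySem.Set.nodup_ofList _) ?_).mpr hmemiff
        exact List.nodup_cons.mpr ⟨hxr, PySem.Set.nodup_ofList r⟩
      have hfuel : r.length ≤ fuel := by
        have h1 : r.length ≤ xs.length := List.length_dropWhile_le _ _
        have h2 : xs.length + 1 ≤ fuel + 1 := hl
        omega
      obtain ⟨ih1, ih2⟩ := ih r hfuel hpr
      have hsum : ∀ (g : Nat → Int),
          ((PySem.Set.ofList (x :: xs)).map (fun k => g ((x :: xs).count k))).sum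
            = g (t.length + 1) + ((PySem.Set.ofList r).map (fun k => g (r.count k))).sum := by
        intro g
        rw [(hperm.map (fun k => g ((x :: xs).count k))).sum_eq, List.map_cons, List.sum_cons, hcx]
        congr 1
        exact congrArg List.sum
          (List.map_congr_left (fun k hk => by rw [hck k (fun h => hxr (h ▸ hk))]))
      constructor
      · show (pvRunScan fuel r).1 + PySem.Int.floordiv ((t.length : Int) + 1) 2 = _
        rw [hsum (fun c => PySem.Int.floordiv ((c : Int)) 2), ih1]
        rw [show ((t.length + 1 : Nat) : Int) = (t.length : Int) + 1 by push_cast; ring]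
        ring
      · show (pvRunScan fuel r).2 + PySem.Int.mod ((t.length : Int) + 1) 2 = _
        rw [hsum (fun c => PySem.Int.mod ((c : Int)) 2), ih2]
        rw [show ((t.length + 1 : Nat) : Int) = (t.length : Int) + 1 by push_cast; ring]
        ring

-- a sum of per-key parities counts the odd keys
theorem pv_sum_mod_two (c : String → Nat) : ∀ (ks : List String),
    (ks.map (fun k => PySem.Int.mod ((c k : Int)) 2)).sum
      = ((ks.countP (fun k => decide (c k % 2 = 1)) : Nat) : Int) := by
  intro ks
  induction ks with
  | nil => simp
  | cons a as ih =>
    rw [List.map_cons, List.sum_cons, ih, List.countP_cons]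
    rw [PySem.Int.mod_eq_emod_of_pos (by norm_num)]
    rcases Nat.mod_two_eq_zero_or_one (c a) with h | h <;> simp [h] <;> omega

-- ===== VERDICT (by name: the statement is the Claim_ definition above) =====
theorem minimumSwap_spec : Claim_equal_minimumSwap := by
  intro s1 s2 _ hpre
  show minimumSwap s1 s2 = minimumSwap_alt s1 s2
  have hms := pv_ms_eq s1.toList s2.toList hpre
  simp only [minimumSwap, minimumSwap_alt]
  rw [pv_foldl_guard pvToggle
        (fun i => PySem.List.pyGetD s1.toList i ' ' ≠ PySem.List.pyGetD s2.toList i ' ')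
        (fun i => String.ofList [PySem.List.pyGetD s1.toList i ' ', PySem.List.pyGetD s2.toList i ' ']),
      hms]
  set ms := ((s1.toList.zip s2.toList).filter (fun p => decide (p.1 ≠ p.2))).map
      (fun p => String.ofList [p.1, p.2]) with hmsdef
  set rest := PySem.List.sorted ms (fun x => x) false with hrestdef
  obtain ⟨hnd, hmem, hsum⟩ := pv_toggle_inv ms
  set st := ms.foldl pvToggle (PySem.Set.empty, 0) with hstdef
  have hperm : rest.Perm ms := PySem.List.sorted_perm ms (fun x => x) false
  have hpw : rest.Pairwise (· ≤ ·) := PySem.List.sorted_pairwise ms (fun x => x)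
  obtain ⟨hB1, hB2⟩ := pv_runScan_spec rest.length rest le_rfl hpw
  -- the two distinct-element lists are permutations of each other
  have hofperm : (PySem.Set.ofList rest).Perm (PySem.Set.ofList ms) := by
    apply (List.perm_ext_iff_of_nodup (PySem.Set.nodup_ofList _) (PySem.Set.nodup_ofList _)).mpr
    intro k
    rw [PySem.Set.mem_ofList, PySem.Set.mem_ofList]
    exact hperm.mem_iff
  have hcnt : ∀ (g : Nat → Int),
      ((PySem.Set.ofList rest).map (fun k => g (rest.count k))).sum
        = ((PySem.Set.ofList ms).map (fun k => g (ms.count k))).sum := by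
    intro g
    rw [List.map_congr_left (fun k _ => by rw [hperm.count_eq]),
        (hofperm.map (fun k => g (ms.count k))).sum_eq]
  -- swaps agree
  have hswaps : (pvRunScan rest.length rest).1 = st.2 := by
    rw [hB1, hcnt (fun c => PySem.Int.floordiv ((c : Int)) 2), hsum]
  -- the size of A's seen set is B's odd counter
  have hstperm : st.1.Perm ((PySem.Set.ofList ms).filter (fun k => decide (ms.count k % 2 = 1))) := by
    apply (List.perm_ext_iff_of_nodup hnd (List.Nodup.filter _ (PySem.Set.nodup_ofList ms))).mpr
    intro k
    rw [hmem k, List.mem_filter, PySem.Set.mem_ofList]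
    simp
  have hodd : (pvRunScan rest.length rest).2 = PySem.Set.len st.1 := by
    rw [hB2, hcnt (fun c => PySem.Int.mod ((c : Int)) 2),
        pv_sum_mod_two (fun k => ms.count k) (PySem.Set.ofList ms)]
    have hlen : st.1.length
        = ((PySem.Set.ofList ms).filter (fun k => decide (ms.count k % 2 = 1))).length :=
      hstperm.length_eq
    rw [← List.countP_eq_length_filter] at hlen
    simp [PySem.Set.len, hlen]
  rw [hswaps, hodd]
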